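-- pv_equiv track=rewrite | github.com/IvoPaitano/algEstrc | apunteTeorico.py | e79
-- ===== SOURCE A (Python) =====
-- def texto_limpio(texto):
--     texto = texto.split()
--     t_limpio = []
--     for i,palabra in enumerate(texto):
--         if palabra == '':
--             continue
--         elif '...' in palabra:
--             t_limpio.append(palabra)
--             continue
--         elif palabra[-1] == '.':
--             a, b = palabra[:-1], palabra[-1]
--             t_limpio.append(a)
--             t_limpio.append(b)
--             continue
--         else:
--             t_limpio.append(palabra)
--     if t_limpio[-1] != '.':
--         t_limpio.append('.')
--     return t_limpio
--
-- def es_corta(palabra,limitePalabra):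
--     return (len(palabra) <= limitePalabra)
--
-- def acortar_palabra(palabra, limitePalabra):
--     return (palabra[:limitePalabra] + '@')
--
-- def e79(texto, limitePalabra, costoPalabraCorta, costoPalabraLarga):
--     textolimpio = texto_limpio(texto)
--     textoFinal = []
--     costo = 0
--     ultimaVuelta = len(textolimpio)-1
--     for i, palabra in enumerate(textolimpio):
--         if palabra == '.' and i == ultimaVuelta:
--             textoFinal.append('STOPSTOP')
--         elif palabra == '.':
--             textoFinal.append('STOP')
--         elif palabra == ',':
--             textoFinal.append(palabra)
--         elif es_corta(palabra, limitePalabra):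
--             costo += costoPalabraCorta
--             textoFinal.append(palabra)
--         else:
--             costo += costoPalabraLarga
--             palabra = acortar_palabra(palabra, limitePalabra)
--             textoFinal.append(palabra)
--     return texto,' '.join(textoFinal), costo
-- ===== SOURCE B (Python) =====
-- def e79(texto, limitePalabra, costoPalabraCorta, costoPalabraLarga):
--     out = []
--     costo = 0
--
--     def tok(t):
--         nonlocal costo
--         if t == '.':
--             out.append('STOP')
--         elif t == ',':
--             out.append(t)
--         elif len(t) <= limitePalabra:
--             costo += costoPalabraCorta
--             out.append(t)
--         else:
--             costo += costoPalabraLarga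
--             out.append(t[:limitePalabra] + '@')
--
--     words = texto.split()
--     for w in words[:-1]:
--         if '...' in w:
--             tok(w)
--         elif w[-1] == '.':
--             tok(w[:-1])
--             tok('.')
--         else:
--             tok(w)
--     last = words[-1]  # IndexError on empty input, same as A
--     if '...' in last or last[-1] != '.':
--         tok(last)
--     else:
--         tok(last[:-1])
--     out.append('STOPSTOP')
--     return texto, ' '.join(out), costo
-- ===== Notes on version B (the rewrite author's own statement) =====
-- stated objective: simpler
-- what changed: Fuses A's two passes (build a cleaned token list, then re-scan it with enumerate and a last-index check) into one pass over texto.split() that emits final tokens and accumulates the cost inline, handling the last word directly instead of via the appended '.' fix-up.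
import Mathlib
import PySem

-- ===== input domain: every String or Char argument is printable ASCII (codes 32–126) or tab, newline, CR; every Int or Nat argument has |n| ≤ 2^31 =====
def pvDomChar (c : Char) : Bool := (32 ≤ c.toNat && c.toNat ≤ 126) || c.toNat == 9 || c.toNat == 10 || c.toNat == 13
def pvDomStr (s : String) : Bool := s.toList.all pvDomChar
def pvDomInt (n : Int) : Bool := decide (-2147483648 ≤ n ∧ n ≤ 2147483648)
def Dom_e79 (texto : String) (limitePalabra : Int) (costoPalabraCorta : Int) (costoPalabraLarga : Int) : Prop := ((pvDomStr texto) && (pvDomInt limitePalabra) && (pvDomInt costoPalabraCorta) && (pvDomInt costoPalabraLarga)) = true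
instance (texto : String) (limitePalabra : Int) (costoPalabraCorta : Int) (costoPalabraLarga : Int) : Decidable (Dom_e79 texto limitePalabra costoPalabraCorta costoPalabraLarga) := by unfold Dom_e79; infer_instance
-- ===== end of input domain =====

-- B fuses A's two passes (clean-token list, then enumerate scan with a last-index check) into one
-- pass over the words, emitting final tokens and the cost inline; objective: simpler, same cost.

-- ===== PORT A =====
-- texto_limpio's loop body (the enumerate index i is unused by the Python loop)
def e79CleanFold (t : List String) (w : String) : List String :=
  if w = "" then t
  else if PySem.Str.isIn "..." w then t ++ [w]
  else match PySem.Str.pyGet? w (-1) with      -- palabra[-1]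
    | some c =>
      if c = '.' then (t ++ [PySem.Str.slice w none (some (-1))]) ++ ["."]   -- append a; append b
      else t ++ [w]
    | none => t     -- unreachable: '' was caught above (Python would raise IndexError)

-- texto_limpio
def textoLimpioPort (texto : String) : List String :=
  let t := (PySem.Str.split₀ texto).foldl e79CleanFold []
  match PySem.List.pyGet? t (-1) with          -- t_limpio[-1]
  | none => t                                  -- Python: IndexError on empty (excluded by Pre_e79)
  | some x => if x ≠ "." then t ++ ["."] else t

def esCorta (palabra : String) (limitePalabra : Int) : Bool :=
  PySem.Str.len palabra ≤ limitePalabra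

-- palabra[:limitePalabra] + '@'  (the concatenation is done on the char lists; exact)
def acortarPalabra (palabra : String) (limitePalabra : Int) : String :=
  String.ofList ((PySem.Str.slice palabra none (some limitePalabra)).toList ++ ['@'])

-- the body of e79's loop; u is ultimaVuelta, p the (i, palabra) pair from enumerate
def e79Step (lim c₁ c₂ u : Int) (st : List String × Int) (p : Int × String) : List String × Int :=
  if p.2 = "." ∧ p.1 = u then (st.1 ++ ["STOPSTOP"], st.2)
  else if p.2 = "." then (st.1 ++ ["STOP"], st.2)
  else if p.2 = "," then (st.1 ++ [p.2], st.2)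
  else if esCorta p.2 lim then (st.1 ++ [p.2], st.2 + c₁)
  else (st.1 ++ [acortarPalabra p.2 lim], st.2 + c₂)

def e79 (texto : String) (limitePalabra : Int) (costoPalabraCorta : Int) (costoPalabraLarga : Int) : String × String × Int :=
  let textolimpio := textoLimpioPort texto
  let ultimaVuelta : Int := (textolimpio.length : Int) - 1
  let st := (PySem.List.enumerate textolimpio).foldl
    (e79Step limitePalabra costoPalabraCorta costoPalabraLarga ultimaVuelta) ([], 0)
  (texto, PySem.Str.join " " st.1, st.2)

-- ===== PORT B =====
-- Source B's nested 'tok': map one cleaned token to its output token, accumulating the cost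
def e79AltTok (lim c₁ c₂ : Int) (st : List String × Int) (t : String) : List String × Int :=
  if t = "." then (st.1 ++ ["STOP"], st.2)
  else if t = "," then (st.1 ++ [t], st.2)
  else if PySem.Str.len t ≤ lim then (st.1 ++ [t], st.2 + c₁)
  else (st.1 ++ [String.ofList ((PySem.Str.slice t none (some lim)).toList ++ ['@'])], st.2 + c₂)

-- Source B's loop body over words[:-1]
def e79AltWord (lim c₁ c₂ : Int) (st : List String × Int) (w : String) : List String × Int :=
  if PySem.Str.isIn "..." w then e79AltTok lim c₁ c₂ st w
  else match PySem.Str.pyGet? w (-1) with      -- w[-1]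
    | some c =>
      if c = '.' then e79AltTok lim c₁ c₂ (e79AltTok lim c₁ c₂ st (PySem.Str.slice w none (some (-1)))) "."
      else e79AltTok lim c₁ c₂ st w
    | none => st    -- unreachable: split() words are nonempty (Python would raise IndexError)

def e79_alt (texto : String) (limitePalabra : Int) (costoPalabraCorta : Int) (costoPalabraLarga : Int) : String × String × Int :=
  let words := PySem.Str.split₀ texto
  let st := (PySem.List.slice words none (some (-1))).foldl
    (e79AltWord limitePalabra costoPalabraCorta costoPalabraLarga) ([], 0)
  match PySem.List.pyGet? words (-1) with      -- words[-1]
  | none => (texto, "", 0)   -- Python: IndexError on whitespace-only input, same as A (excluded by Pre_e79)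
  | some last =>
    let st := if PySem.Str.isIn "..." last = true ∨ PySem.Str.pyGet? last (-1) ≠ some '.'
              then e79AltTok limitePalabra costoPalabraCorta costoPalabraLarga st last
              else e79AltTok limitePalabra costoPalabraCorta costoPalabraLarga st (PySem.Str.slice last none (some (-1)))
    (texto, PySem.Str.join " " (st.1 ++ ["STOPSTOP"]), st.2)

-- ===== PRECONDITION & SPEC =====
-- A (and B) raise IndexError when texto.split() is empty, i.e. on whitespace-only texto; exactly those inputs are excluded.
def Pre_e79 (texto : String) (limitePalabra : Int) (costoPalabraCorta : Int) (costoPalabraLarga : Int) : Prop :=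
  PySem.Str.split₀ texto ≠ []
instance (texto : String) (limitePalabra : Int) (costoPalabraCorta : Int) (costoPalabraLarga : Int) : Decidable (Pre_e79 texto limitePalabra costoPalabraCorta costoPalabraLarga) := by unfold Pre_e79; infer_instance

def pvWitness_e79 : String × Int × Int × Int := ("hola, mundo entero.", 5, 1, 2)

def Spec_e79 (texto : String) (limitePalabra : Int) (costoPalabraCorta : Int) (costoPalabraLarga : Int) (out : String × String × Int) : Prop := out = e79_alt texto limitePalabra costoPalabraCorta costoPalabraLarga
instance (texto : String) (limitePalabra : Int) (costoPalabraCorta : Int) (costoPalabraLarga : Int) (out : String × String × Int) : Decidable (Spec_e79 texto limitePalabra costoPalabraCorta costoPalabraLarga out) := by unfold Spec_e79; infer_instance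

-- ===== CLAIM (what is proved, stated in full; the proofs are below) =====
def Claim_equal_e79 : Prop := ∀ (texto : String) (limitePalabra : Int) (costoPalabraCorta : Int) (costoPalabraLarga : Int), Dom_e79 texto limitePalabra costoPalabraCorta costoPalabraLarga → Pre_e79 texto limitePalabra costoPalabraCorta costoPalabraLarga → Spec_e79 texto limitePalabra costoPalabraCorta costoPalabraLarga (e79 texto limitePalabra costoPalabraCorta costoPalabraLarga)

-- ===== LEMMAS AND PROOFS =====

-- the cleaned tokens texto_limpio's loop produces for one word
def pvClean1 (w : String) : List String :=
  if w = "" then []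
  else if PySem.Str.isIn "..." w then [w]
  else match PySem.Str.pyGet? w (-1) with
    | some c => if c = '.' then [PySem.Str.slice w none (some (-1)), "."] else [w]
    | none => []

lemma pvCleanFold_eq (t : List String) (w : String) :
    e79CleanFold t w = t ++ pvClean1 w := by
  unfold e79CleanFold pvClean1
  split_ifs with h1 h2
  · simp
  · rfl
  · cases hg : PySem.Str.pyGet? w (-1) with
    | none => simp
    | some c => by_cases hc : c = '.' <;> simp [hc]

lemma pvFlatClean (ws : List String) :
    ws.foldl e79CleanFold [] = ws.flatMap pvClean1 := by
  rw [show e79CleanFold = fun t w => t ++ pvClean1 w from funext₂ pvCleanFold_eq,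
      PySem.List.foldl_append_eq_flatMap]
  rfl

lemma pvAltWord_eq (lim c₁ c₂ : Int) (st : List String × Int) (w : String) :
    e79AltWord lim c₁ c₂ st w = (pvClean1 w).foldl (e79AltTok lim c₁ c₂) st := by
  unfold e79AltWord pvClean1
  by_cases h0 : w = ""
  · subst h0
    rw [if_neg (by decide), if_pos rfl]
    have hg : PySem.Str.pyGet? "" (-1) = none := by decide
    rw [hg]; rfl
  · rw [if_neg h0]
    by_cases h1 : PySem.Str.isIn "..." w = true
    · rw [if_pos h1, if_pos h1, List.foldl_cons, List.foldl_nil]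
    · rw [if_neg h1, if_neg h1]
      cases hg : PySem.Str.pyGet? w (-1) with
      | none => rfl
      | some c =>
        dsimp only
        by_cases hc : c = '.'
        · rw [if_pos hc, if_pos hc, List.foldl_cons, List.foldl_cons, List.foldl_nil]
        · rw [if_neg hc, if_neg hc, List.foldl_cons, List.foldl_nil]

lemma pvAltFold_eq (lim c₁ c₂ : Int) (ws : List String) (st : List String × Int) :
    ws.foldl (e79AltWord lim c₁ c₂) st = (ws.flatMap pvClean1).foldl (e79AltTok lim c₁ c₂) st := by
  induction ws generalizing st with
  | nil => rfl
  | cons w ws ih => simp [List.flatMap_cons, List.foldl_append, pvAltWord_eq, ih]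

lemma pvSplitGoNeNil : ∀ (s cur : List Char) (acc : List (List Char)),
    (∀ w ∈ acc, w ≠ []) → ∀ w ∈ PySem.Chars.split₀.go s cur acc, w ≠ [] := by
  intro s
  induction s with
  | nil =>
    intro cur acc hacc w hw
    rw [PySem.Chars.split₀.go.eq_def] at hw
    by_cases hc : cur.isEmpty = true
    · simp only [if_pos hc, List.mem_reverse] at hw
      exact hacc _ hw
    · simp only [if_neg hc, List.mem_reverse, List.mem_cons] at hw
      rcases hw with h | h
      · subst h; simpa [List.isEmpty_iff] using hc
      · exact hacc _ h
  | cons c rest ih =>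
    intro cur acc hacc w hw
    rw [PySem.Chars.split₀.go.eq_def] at hw
    by_cases hs : PySem.Chars.isspace c = true
    · simp only [if_pos hs] at hw
      by_cases hc : cur.isEmpty = true
      · simp only [if_pos hc] at hw
        exact ih _ _ hacc w hw
      · simp only [if_neg hc] at hw
        refine ih _ _ ?_ w hw
        intro v hv
        rcases List.mem_cons.mp hv with h | h
        · subst h; simpa [List.isEmpty_iff] using hc
        · exact hacc _ h
    · simp only [if_neg hs] at hw
      exact ih _ _ hacc w hw

lemma pvSplitNeNil (s w : String) (h : w ∈ PySem.Str.split₀ s) : w ≠ "" := by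
  have h2 : w.toList ∈ PySem.Chars.split₀ s.toList := by
    rw [← PySem.Str.split₀_map_toList]
    exact List.mem_map_of_mem h
  have h3 := pvSplitGoNeNil s.toList [] [] (by simp) w.toList h2
  intro he; subst he; simp at h3

lemma pvStepA_eq_tok (lim c₁ c₂ u : Int) (st : List String × Int) (p : Int × String)
    (h : p.1 ≠ u) : e79Step lim c₁ c₂ u st p = e79AltTok lim c₁ c₂ st p.2 := by
  unfold e79Step e79AltTok esCorta acortarPalabra
  rw [if_neg (fun hand => h hand.2)]
  simp only [decide_eq_true_eq]

lemma pvALoop (lim c₁ c₂ u : Int) : ∀ (m : List String) (s : Int) (st : List String × Int),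
    s + m.length ≤ u →
    (PySem.List.enumerate m s).foldl (e79Step lim c₁ c₂ u) st = m.foldl (e79AltTok lim c₁ c₂) st := by
  intro m
  induction m with
  | nil => intro s st _; rfl
  | cons x xs ih =>
    intro s st h
    rw [PySem.List.enumerate_cons]
    simp only [List.foldl_cons]
    rw [pvStepA_eq_tok lim c₁ c₂ u st (s, x) (by simp at h ⊢; omega)]
    exact ih (s + 1) _ (by simp at h ⊢; omega)

-- the final enumerate step: index u = len m hits the STOPSTOP branch
lemma pvStepTop (lim c₁ c₂ : Int) (m : List String) (st : List String × Int) :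
    e79Step lim c₁ c₂ (m.length : Int) st ((0 : Int) + (m.length : Int), ".") = (st.1 ++ ["STOPSTOP"], st.2) := by
  unfold e79Step
  rw [if_pos (show ("." : String) = "." ∧ (0 : Int) + (m.length : Int) = (m.length : Int) from ⟨rfl, by simp⟩)]

-- A's enumerate loop over a cleaned list ending in '.' is B's token fold plus the final STOPSTOP
lemma pvAEnum (lim c₁ c₂ : Int) (m : List String) :
    (PySem.List.enumerate (m ++ ["."])).foldl
      (e79Step lim c₁ c₂ (((m ++ ["."]).length : Int) - 1)) ([], 0) =
    ((m.foldl (e79AltTok lim c₁ c₂) ([], 0)).1 ++ ["STOPSTOP"],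
     (m.foldl (e79AltTok lim c₁ c₂) ([], 0)).2) := by
  have hu : ((m ++ ["."]).length : Int) - 1 = (m.length : Int) := by
    simp
  rw [hu, PySem.List.enumerate_append, List.foldl_append,
      pvALoop lim c₁ c₂ (m.length : Int) m 0 ([], 0) (by simp)]
  rw [PySem.List.enumerate_cons]
  simp only [PySem.List.enumerate_nil, List.foldl_cons, List.foldl_nil]
  exact pvStepTop lim c₁ c₂ m _

lemma pvGetAppendDot (l : List String) :
    PySem.List.pyGet? (l ++ ["."]) (-1) = some "." := by
  rw [PySem.List.pyGet?_neg_one]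
  simp

-- last char of a nonempty string, as the Python w[-1]
lemma pvStrGetNeg (w : String) (h : w ≠ "") : ∃ c, PySem.Str.pyGet? w (-1) = some c := by
  have ht : w.toList ≠ [] := fun he => h (by
    have := congrArg String.ofList he
    simpa using this)
  simp only [PySem.Str.pyGet?_eq, PySem.Chars.pyGet?_eq_listPyGet?, PySem.List.pyGet?_neg_one]
  exact Option.isSome_iff_exists.mp (List.getLast?_isSome.mpr ht)

-- ===== VERDICT (by name: the statement is the Claim_ definition above) =====
theorem e79_spec : Claim_equal_e79 := by
  intro texto lim c₁ c₂ _ hpre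
  unfold Pre_e79 at hpre
  unfold Spec_e79 e79 e79_alt textoLimpioPort
  dsimp only
  obtain ⟨ws, hws⟩ : ∃ l, PySem.Str.split₀ texto = l := ⟨_, rfl⟩
  rw [hws] at hpre ⊢
  set last := ws.getLast hpre with hlastdef
  set I := ws.dropLast with hI
  have hlast : I ++ [last] = ws := List.dropLast_append_getLast hpre
  have hlastne : last ≠ "" := pvSplitNeNil texto last (by rw [hws]; exact List.getLast_mem hpre)
  have hget : PySem.List.pyGet? ws (-1) = some last := by
    rw [PySem.List.pyGet?_neg_one, List.getLast?_eq_some_getLast hpre]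
  have hslice : PySem.List.slice ws none (some (-1)) = I := PySem.List.slice_to_neg_one ws
  rw [hget, hslice, pvAltFold_eq]
  dsimp only
  set F := I.flatMap pvClean1 with hF
  set st0 := F.foldl (e79AltTok lim c₁ c₂) ([], 0) with hst0
  have hflat : ws.foldl e79CleanFold [] = F ++ pvClean1 last := by
    have h1 : List.flatMap pvClean1 [last] = pvClean1 last := by simp
    rw [pvFlatClean]
    conv_lhs => rw [← hlast]
    rw [List.flatMap_append, h1]
  rw [hflat]
  obtain ⟨c, hc⟩ := pvStrGetNeg last hlastne
  by_cases hIn : PySem.Str.isIn "..." last = true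
  · -- last contains '...': cleaned ends in last ≠ '.', A appends the final '.'
    have hne : last ≠ "." := by
      intro he; rw [he] at hIn; exact absurd hIn (by decide)
    have hclean : pvClean1 last = [last] := by
      unfold pvClean1; rw [if_neg hlastne, if_pos hIn]
    have hget2 : PySem.List.pyGet? (F ++ [last]) (-1) = some last := by
      rw [PySem.List.pyGet?_neg_one]; simp
    rw [hclean, hget2]
    dsimp only
    rw [if_pos hne]
    rw [show F ++ [last] ++ ["."] = (F ++ [last]) ++ ["."] from rfl, pvAEnum]
    rw [if_pos (Or.inl hIn)]
    simp [List.foldl_append, hst0]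
  · by_cases hdot : c = '.'
    · -- last ends in '.': cleaned is F ++ [last[:-1], '.'], already ends in '.'
      subst hdot
      have hclean : pvClean1 last = [PySem.Str.slice last none (some (-1)), "."] := by
        unfold pvClean1; rw [if_neg hlastne, if_neg hIn, hc]; simp
      rw [hclean]
      rw [show F ++ [PySem.Str.slice last none (some (-1)), "."]
            = (F ++ [PySem.Str.slice last none (some (-1))]) ++ ["."] by simp]
      rw [pvGetAppendDot]
      dsimp only
      rw [if_neg (fun h => h rfl)]
      rw [pvAEnum]
      rw [if_neg (fun hor => hor.elim hIn (fun h => h hc))]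
      simp [List.foldl_append, hst0]
    · -- last neither contains '...' nor ends in '.': A appends the final '.'
      have hne : last ≠ "." := by
        intro he; rw [he] at hc
        have h2 : c = '.' := by
          have h3 : PySem.Str.pyGet? "." (-1) = some '.' := by decide
          rw [h3] at hc; exact (Option.some_inj.mp hc).symm
        exact hdot h2
      have hclean : pvClean1 last = [last] := by
        unfold pvClean1; rw [if_neg hlastne, if_neg hIn, hc]; simp [hdot]
      have hget2 : PySem.List.pyGet? (F ++ [last]) (-1) = some last := by
        rw [PySem.List.pyGet?_neg_one]; simp
      rw [hclean, hget2]
      dsimp only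
      rw [if_pos hne]
      rw [show F ++ [last] ++ ["."] = (F ++ [last]) ++ ["."] from rfl, pvAEnum]
      rw [if_pos (Or.inr (by rw [hc]; intro h; exact hdot (Option.some_inj.mp h)))]
      simp [List.foldl_append, hst0]
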